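-- pv_equiv track=rewrite | github.com/Jupiter-J/Python-Algorithm | 이코테/그리디/추가문제.py | solution
-- ===== SOURCE A (Python) =====
-- def solution(nums, k):
--     total = sum(nums)
--     m = len(nums)-k
--     score = 0
--
--     for i in range(m):
--         score += nums[i]
--     mins = score
--     left = 0
--     for right in range(m, len(nums)):
--         score +=(nums[right] - nums[left])
--         left +=1
--         mins= min(mins, score)
--
--     return total - mins
-- ===== SOURCE B (Python) =====
-- def solution(nums, k):
--     n = len(nums)
--     m = n - k
--     prefix = [0]
--     for x in nums:
--         prefix.append(prefix[-1] + x)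
--     mins = min(prefix[i + m] - prefix[i] for i in range(n - m + 1))
--     return prefix[n] - mins
-- ===== Notes on version B (the rewrite author's own statement) =====
-- stated objective: alternative
-- what changed: Replaces the incremental sliding-window scan (running score updated with nums[right]-nums[left] and an in-loop min) with a precomputed prefix-sum table followed by a fresh scan taking the min of prefix[i+m]-prefix[i] over all window starts.
import Mathlib
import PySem

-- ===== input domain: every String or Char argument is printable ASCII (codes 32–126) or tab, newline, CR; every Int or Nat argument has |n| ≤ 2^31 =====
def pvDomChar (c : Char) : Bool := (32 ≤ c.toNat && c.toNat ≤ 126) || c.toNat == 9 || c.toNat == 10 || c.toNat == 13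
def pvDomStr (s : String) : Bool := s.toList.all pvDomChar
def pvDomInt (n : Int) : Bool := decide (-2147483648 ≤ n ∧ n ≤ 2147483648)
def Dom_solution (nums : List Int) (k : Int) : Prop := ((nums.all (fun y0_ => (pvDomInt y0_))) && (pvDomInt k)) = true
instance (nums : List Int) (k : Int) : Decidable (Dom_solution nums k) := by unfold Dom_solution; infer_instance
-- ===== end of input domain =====

-- B replaces A's incremental sliding-window scan by a prefix-sum table plus a fresh
-- min-over-window-starts scan (same O(n) cost, different decomposition).

-- ===== PORT A =====
def solution (nums : List Int) (k : Int) : Int :=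
  let total := nums.sum
  let m : Int := (nums.length : Int) - k
  let score := (PySem.List.pyRange 0 m 1).foldl
    (fun s i => s + PySem.List.pyGetD nums i 0) 0
  let st := (PySem.List.pyRange m (nums.length : Int) 1).foldl
    (fun (p : Int × Int × Int) r =>
      let sc := p.1 + (PySem.List.pyGetD nums r 0 - PySem.List.pyGetD nums p.2.1 0)
      (sc, p.2.1 + 1, min p.2.2 sc))
    (score, 0, score)
  total - st.2.2

-- ===== PORT B =====
def solution_alt (nums : List Int) (k : Int) : Int :=
  let n : Int := (nums.length : Int)
  let m : Int := n - k
  let pre := nums.foldl (fun acc x => acc ++ [PySem.List.pyGetD acc (-1) 0 + x]) [0]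
  let mins := (PySem.List.min?
      ((PySem.List.pyRange 0 (n - m + 1) 1).map
        (fun i => PySem.List.pyGetD pre (i + m) 0 - PySem.List.pyGetD pre i 0))
      (fun x => x)).getD 0
  PySem.List.pyGetD pre n 0 - mins

-- ===== PRECONDITION & SPEC =====
-- Pre_ excludes exactly the inputs on which A raises IndexError (it returns a value on
-- every other input): for k < 0 the first loop reads nums[i] up to i = len-k-1 ≥ len,
-- and for k > len the second loop runs len-m = k iterations so left reaches k-1 ≥ len
-- and nums[left] raises (even though nums[right] wraps for negative right, the loop
-- never completes); B also raises on all of these inputs.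
def Pre_solution (nums : List Int) (k : Int) : Prop := 0 ≤ k ∧ k ≤ (nums.length : Int)
instance (nums : List Int) (k : Int) : Decidable (Pre_solution nums k) := by
  unfold Pre_solution; infer_instance
def pvWitness_solution : List Int × Int := ([1, 2, 3], 1)

def Spec_solution (nums : List Int) (k : Int) (out : Int) : Prop := out = solution_alt nums k
instance (nums : List Int) (k : Int) (out : Int) : Decidable (Spec_solution nums k out) := by
  unfold Spec_solution; infer_instance

-- ===== CLAIM (what is proved, stated in full; the proofs are below) =====
def Claim_equal_solution : Prop := ∀ (nums : List Int) (k : Int),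
  Dom_solution nums k → Pre_solution nums k → Spec_solution nums k (solution nums k)

-- ===== LEMMAS AND PROOFS =====

-- prefix sum P j = sum of the first j elements, and the window sum W i = P (i+m) - P i
def pvP (nums : List Int) (j : Nat) : Int := (nums.take j).sum
def pvW (nums : List Int) (m i : Nat) : Int := pvP nums (i + m) - pvP nums i

lemma pvP_succ (nums : List Int) (j : Nat) (h : j < nums.length) :
    pvP nums (j + 1) = pvP nums j + nums[j] := by
  simp [pvP, List.sum_take_succ nums j h]

lemma pv_sum_range (nums : List Int) (j : Nat) (hj : j ≤ nums.length) :
    ((List.range j).map (fun t => nums.getD t 0)).sum = pvP nums j := by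
  induction j with
  | zero => simp [pvP]
  | succ j ih =>
      have hj' : j < nums.length := by omega
      rw [List.range_succ, List.map_append, List.sum_append, ih (by omega),
        pvP_succ nums j hj']
      simp [List.getD_eq_getElem?_getD, hj']

lemma pv_prefix_fold (l acc : List Int) (a : Int) :
    l.foldl (fun acc x => acc ++ [PySem.List.pyGetD acc (-1) 0 + x]) (acc ++ [a])
      = acc ++ [a] ++ (List.range l.length).map (fun j => a + (l.take (j + 1)).sum) := by
  induction l generalizing acc a with
  | nil => simp
  | cons x l ih =>
      simp only [List.foldl_cons, PySem.List.pyGetD_neg_one_append_singleton]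
      rw [ih (acc ++ [a]) (a + x)]
      simp [List.range_succ_eq_map, List.map_map, Function.comp, List.take_succ_cons, add_assoc]

lemma pv_prefix_eq (nums : List Int) :
    nums.foldl (fun acc x => acc ++ [PySem.List.pyGetD acc (-1) 0 + x]) [0]
      = (List.range (nums.length + 1)).map (fun j => pvP nums j) := by
  have h := pv_prefix_fold nums [] 0
  simp only [List.nil_append] at h
  rw [h, List.range_succ_eq_map, List.map_cons, List.map_map]
  simp [pvP, Function.comp]

-- the invariant of A's second loop: state after j steps is (W j, j, running min of W 0..W j)
lemma pv_loopA (nums : List Int) (mN kN : Nat) (hmk : mN + kN = nums.length)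
    (j : Nat) (hj : j ≤ kN) :
    ((List.range j).map (fun (t : Nat) => ((mN : Int) + (t : Int)))).foldl
      (fun (p : Int × Int × Int) r =>
        let sc := p.1 + (PySem.List.pyGetD nums r 0 - PySem.List.pyGetD nums p.2.1 0)
        (sc, p.2.1 + 1, min p.2.2 sc))
      (pvP nums mN, 0, pvP nums mN)
    = (pvW nums mN j, (j : Int),
       ((List.range j).map (fun t => pvW nums mN (t + 1))).foldl min (pvW nums mN 0)) := by
  induction j with
  | zero => simp [pvW, pvP]
  | succ j ih =>
      have hlt : j < kN := by omega
      rw [List.range_succ, List.map_append, List.map_append, List.foldl_append,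
        List.foldl_append, ih (by omega)]
      simp only [List.map_cons, List.map_nil, List.foldl_cons, List.foldl_nil]
      have h1 : (mN : Int) + (j : Int) = ((mN + j : Nat) : Int) := by push_cast; ring
      have h2 : PySem.List.pyGetD nums ((mN : Int) + (j : Int)) 0 = nums.getD (mN + j) 0 := by
        rw [h1, PySem.List.pyGetD_natCast]
      have h3 : PySem.List.pyGetD nums ((j : Nat) : Int) 0 = nums.getD j 0 := by
        rw [PySem.List.pyGetD_natCast]
      have hmj : mN + j < nums.length := by omega
      have hjn : j < nums.length := by omega
      have hsc : pvW nums mN j + (nums.getD (mN + j) 0 - nums.getD j 0) = pvW nums mN (j + 1) := by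
        simp only [List.getD_eq_getElem?_getD, List.getElem?_eq_getElem hmj,
          List.getElem?_eq_getElem hjn, Option.getD_some]
        have e1 : pvP nums (j + 1 + mN) = pvP nums (j + mN) + nums[j + mN] := by
          have := pvP_succ nums (j + mN) (by omega)
          simpa [Nat.add_right_comm] using this
        have e2 : pvP nums (j + 1) = pvP nums j + nums[j] := pvP_succ nums j hjn
        have e3 : nums[j + mN] = nums[mN + j] := by congr 1; omega
        simp only [pvW, e1, e2, e3]
        ring
      simp only [h2, h3]
      refine Prod.ext ?_ (Prod.ext ?_ ?_)
      · simpa using hsc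
      · simp
      · rw [hsc]

theorem pv_main (nums : List Int) (k : Int) (hk0 : 0 ≤ k) (hkn : k ≤ (nums.length : Int)) :
    solution nums k = solution_alt nums k := by
  obtain ⟨kN, rfl⟩ : ∃ kN : Nat, k = (kN : Int) := ⟨k.toNat, (Int.toNat_of_nonneg hk0).symm⟩
  have hkn' : kN ≤ nums.length := by exact_mod_cast hkn
  have hmInt : ((nums.length : Int) - (kN : Int)) = ((nums.length - kN : Nat) : Int) := by omega
  -- A's first loop computes the prefix sum P (n - k)
  have hscore : (PySem.List.pyRange 0 ((nums.length : Int) - (kN : Int)) 1).foldl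
      (fun s i => s + PySem.List.pyGetD nums i 0) 0 = pvP nums (nums.length - kN) := by
    rw [hmInt, PySem.List.pyRange_one, List.foldl_map]
    simp only [Int.sub_zero, Int.toNat_natCast, zero_add, PySem.List.pyGetD_natCast]
    rw [PySem.List.foldl_add (List.range (nums.length - kN)) (fun t => nums.getD t 0) 0,
      pv_sum_range nums (nums.length - kN) (by omega)]
    ring
  -- A's second loop, by the invariant
  have hloop : (PySem.List.pyRange ((nums.length : Int) - (kN : Int)) ((nums.length : Int)) 1).foldl
      (fun (p : Int × Int × Int) r =>
        let sc := p.1 + (PySem.List.pyGetD nums r 0 - PySem.List.pyGetD nums p.2.1 0)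
        (sc, p.2.1 + 1, min p.2.2 sc))
      (pvP nums (nums.length - kN), 0, pvP nums (nums.length - kN))
      = (pvW nums (nums.length - kN) kN, (kN : Int),
         ((List.range kN).map (fun t => pvW nums (nums.length - kN) (t + 1))).foldl min
           (pvW nums (nums.length - kN) 0)) := by
    rw [hmInt, PySem.List.pyRange_one]
    have hto : ((nums.length : Int) - ((nums.length - kN : Nat) : Int)).toNat = kN := by omega
    rw [hto]
    exact pv_loopA nums (nums.length - kN) kN (by omega) kN le_rfl
  have hA : solution nums (kN : Int) = nums.sum -
      ((List.range kN).map (fun t => pvW nums (nums.length - kN) (t + 1))).foldl min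
        (pvW nums (nums.length - kN) 0) := by
    simp only [solution]
    rw [hscore, hloop]
  -- B's window list is the list of window sums W 0 .. W kN
  have hmap : ((List.range (kN + 1)).map (fun (t : Nat) =>
        PySem.List.pyGetD ((List.range (nums.length + 1)).map (fun j => pvP nums j))
          ((0 : Int) + (t : Int) + ((nums.length : Int) - (kN : Int))) 0
      - PySem.List.pyGetD ((List.range (nums.length + 1)).map (fun j => pvP nums j))
          ((0 : Int) + (t : Int)) 0))
      = (List.range (kN + 1)).map (fun t => pvW nums (nums.length - kN) t) := by
    apply List.map_congr_left
    intro t ht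
    have ht' : t < kN + 1 := List.mem_range.mp ht
    have e1 : (0 : Int) + (t : Int) + ((nums.length : Int) - (kN : Int))
        = ((t + (nums.length - kN) : Nat) : Int) := by push_cast; omega
    have e2 : (0 : Int) + (t : Int) = ((t : Nat) : Int) := by omega
    rw [e1, e2, PySem.List.pyGetD_natCast, PySem.List.pyGetD_natCast,
      PySem.List.getD_map_range _ _ _ _ (by omega), PySem.List.getD_map_range _ _ _ _ (by omega)]
    rfl
  have hB : solution_alt nums (kN : Int) = pvP nums nums.length -
      ((List.range kN).map (fun t => pvW nums (nums.length - kN) (t + 1))).foldl min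
        (pvW nums (nums.length - kN) 0) := by
    simp only [solution_alt, pv_prefix_eq]
    have hb : (nums.length : Int) - ((nums.length : Int) - (kN : Int)) + 1 - 0 = ((kN + 1 : Nat) : Int) := by
      push_cast; omega
    rw [PySem.List.pyRange_one]
    rw [hb, Int.toNat_natCast]
    rw [List.map_map]
    have hcomp : ((fun i => PySem.List.pyGetD ((List.range (nums.length + 1)).map (fun j => pvP nums j)) (i + ((nums.length : Int) - (kN : Int))) 0
        - PySem.List.pyGetD ((List.range (nums.length + 1)).map (fun j => pvP nums j)) i 0) ∘ (fun (t : Nat) => (0 : Int) + (t : Int)))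
        = (fun (t : Nat) =>
        PySem.List.pyGetD ((List.range (nums.length + 1)).map (fun j => pvP nums j))
          ((0 : Int) + (t : Int) + ((nums.length : Int) - (kN : Int))) 0
      - PySem.List.pyGetD ((List.range (nums.length + 1)).map (fun j => pvP nums j))
          ((0 : Int) + (t : Int)) 0) := rfl
    rw [hcomp, hmap]
    have hlast : PySem.List.pyGetD ((List.range (nums.length + 1)).map (fun j => pvP nums j))
        ((nums.length : Int)) 0 = pvP nums nums.length := by
      rw [show ((nums.length : Int)) = ((nums.length : Nat) : Int) from rfl,
        PySem.List.pyGetD_natCast, PySem.List.getD_map_range _ _ _ _ (by omega)]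
    rw [hlast]
    rw [List.range_succ_eq_map, List.map_cons, List.map_map]
    have hcomp2 : ((fun t => pvW nums (nums.length - kN) t) ∘ Nat.succ)
        = (fun t => pvW nums (nums.length - kN) (t + 1)) := rfl
    rw [hcomp2, PySem.List.min?_id_cons, Option.getD_some]
  rw [hA, hB]
  have : nums.sum = pvP nums nums.length := by simp [pvP]
  rw [this]

-- ===== VERDICT (by name: the statement is the Claim_ definition above) =====
theorem solution_spec : Claim_equal_solution := by
  intro nums k _ hpre
  unfold Spec_solution
  exact pv_main nums k hpre.1 hpre.2
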